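-- pv_equiv track=rewrite | github.com/inet-tub/AugmentRoute | Algorithms/Greedy.py | checkPathUpdated
-- ===== SOURCE A (Python) =====
-- def checkPathUpdated(currentPath, updatedPath):
--     if(len(updatedPath) != len(currentPath)):
--         return False
--     currrentTemp = list(currentPath)
--     updatedTemp = list(updatedPath)
--     currrentTemp.sort()
--     updatedTemp.sort()
--     for i in range(len(currrentTemp)):
--         if(currrentTemp[i] != updatedTemp[i]):
--             return False
--     return True
-- ===== SOURCE B (Python) =====
-- def checkPathUpdated(currentPath, updatedPath):
--     if len(updatedPath) != len(currentPath):
--         return False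
--     counts = {}
--     for x in currentPath:
--         counts[x] = counts.get(x, 0) + 1
--     for x in updatedPath:
--         c = counts.get(x, 0)
--         if c == 0:
--             return False
--         counts[x] = c - 1
--     return True
-- ===== Notes on version B (the rewrite author's own statement) =====
-- stated objective: alternative
-- what changed: Replaces sort-both-copies-and-compare-elementwise with a hash-table multiset check: one pass builds a frequency dict over currentPath, a second pass decrements it along updatedPath with early False on a missing/exhausted element.
import Mathlib
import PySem

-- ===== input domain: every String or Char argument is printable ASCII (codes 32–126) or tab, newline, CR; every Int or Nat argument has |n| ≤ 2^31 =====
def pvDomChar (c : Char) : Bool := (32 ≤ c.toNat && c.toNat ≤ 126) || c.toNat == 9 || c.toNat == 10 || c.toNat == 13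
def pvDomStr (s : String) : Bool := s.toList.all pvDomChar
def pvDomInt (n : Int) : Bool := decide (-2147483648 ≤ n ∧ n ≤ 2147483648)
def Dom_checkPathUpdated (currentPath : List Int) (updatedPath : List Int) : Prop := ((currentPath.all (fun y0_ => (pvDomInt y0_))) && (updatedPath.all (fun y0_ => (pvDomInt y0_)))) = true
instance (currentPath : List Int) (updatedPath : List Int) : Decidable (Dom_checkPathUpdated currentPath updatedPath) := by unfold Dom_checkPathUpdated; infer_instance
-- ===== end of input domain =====

-- B replaces sort-both-copies-then-compare with a frequency-dict build over currentPath
-- and a decrementing pass over updatedPath (objective: alternative algorithm, same return value).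

-- ===== PORT A =====
-- the 'for i in range(len(currrentTemp)): if ct[i] != ut[i]: return False' loop, iterating the index list
def pvALoop (ct : List Int) (ut : List Int) : List Int → Bool
  | [] => true
  | i :: rest =>
    if PySem.List.pyGetD ct i 0 ≠ PySem.List.pyGetD ut i 0 then false
    else pvALoop ct ut rest

def checkPathUpdated (currentPath : List Int) (updatedPath : List Int) : Bool :=
  if updatedPath.length ≠ currentPath.length then false
  else
    let currrentTemp := PySem.List.sorted currentPath (fun x => x) false
    let updatedTemp := PySem.List.sorted updatedPath (fun x => x) false
    pvALoop currrentTemp updatedTemp (PySem.List.pyRange 0 currrentTemp.length 1)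

-- ===== PORT B =====
-- the second loop of Source B: decrement counts along updatedPath, early False on a missing/exhausted element
def pvBDec (d : PySem.Dict Int Int) : List Int → Bool
  | [] => true
  | x :: xs =>
    let c := d.getD x 0
    if c = 0 then false else pvBDec (d.insert x (c - 1)) xs

def checkPathUpdated_alt (currentPath : List Int) (updatedPath : List Int) : Bool :=
  if updatedPath.length ≠ currentPath.length then false
  else
    let counts := currentPath.foldl (fun d x => d.insert x (d.getD x 0 + 1)) PySem.Dict.empty
    pvBDec counts updatedPath

-- ===== PRECONDITION & SPEC =====
def Spec_checkPathUpdated (currentPath : List Int) (updatedPath : List Int) (out : Bool) : Prop := out = checkPathUpdated_alt currentPath updatedPath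
instance (currentPath : List Int) (updatedPath : List Int) (out : Bool) : Decidable (Spec_checkPathUpdated currentPath updatedPath out) := by unfold Spec_checkPathUpdated; infer_instance

-- ===== CLAIM (what is proved, stated in full; the proofs are below) =====
def Claim_equal_checkPathUpdated : Prop := ∀ (currentPath : List Int) (updatedPath : List Int), Dom_checkPathUpdated currentPath updatedPath → Spec_checkPathUpdated currentPath updatedPath (checkPathUpdated currentPath updatedPath)

-- ===== LEMMAS AND PROOFS =====

-- A's index loop succeeds iff the two sorted copies agree at every listed index
theorem pvALoop_eq_true_iff (ct ut : List Int) (idxs : List Int) :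
    pvALoop ct ut idxs = true ↔
      ∀ i ∈ idxs, PySem.List.pyGetD ct i 0 = PySem.List.pyGetD ut i 0 := by
  induction idxs with
  | nil => simp [pvALoop]
  | cons i rest ih =>
    by_cases h : PySem.List.pyGetD ct i 0 = PySem.List.pyGetD ut i 0
    · simp [pvALoop, h, ih]
    · simp [pvALoop, h]

-- for equal-length lists, A's loop over range(len) succeeds iff the lists are equal
theorem pvALoop_range (ct ut : List Int) (hlen : ut.length = ct.length) :
    pvALoop ct ut (PySem.List.pyRange 0 ct.length 1) = true ↔ ct = ut := by
  rw [pvALoop_eq_true_iff]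
  constructor
  · intro h
    apply List.ext_getElem (by omega)
    intro n hn hn'
    have := h (n : Int) (by
      rw [PySem.List.mem_pyRange_one]
      constructor <;> [positivity; exact_mod_cast hn])
    simpa [PySem.List.pyGetD_natCast, List.getD_eq_getElem?_getD,
      List.getElem?_eq_getElem, hn, hn'] using this
  · rintro rfl i _; rfl

-- B's decrement loop succeeds iff every element's multiplicity fits the remaining counts
theorem pvBDec_eq_true_iff (l : List Int) (d : PySem.Dict Int Int)
    (hpos : ∀ y, 0 ≤ d.getD y 0) :
    pvBDec d l = true ↔ ∀ y, (l.count y : Int) ≤ d.getD y 0 := by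
  induction l generalizing d with
  | nil => simpa [pvBDec] using hpos
  | cons x xs ih =>
    by_cases hx : d.getD x 0 = 0
    · simp only [pvBDec, hx, if_true]
      constructor
      · intro h; exact absurd h (by simp)
      · intro h
        have := h x
        rw [List.count_cons_self, hx] at this
        omega
    · have hx1 : 1 ≤ d.getD x 0 := lt_of_le_of_ne (hpos x) (Ne.symm hx)
      simp only [pvBDec, hx, if_false]
      rw [ih ((d.insert x (d.getD x 0 - 1)))
        (by intro y; rw [PySem.Dict.getD_insert]; split_ifs with h
            · omega
            · exact hpos y)]
      constructor
      · intro h y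
        have := h y
        rw [PySem.Dict.getD_insert] at this
        by_cases hy : y = x
        · subst hy; rw [if_pos rfl] at this
          rw [List.count_cons_self]; push_cast; push_cast at this; omega
        · rw [if_neg hy] at this
          rw [List.count_cons_of_ne (Ne.symm hy)]; exact this
      · intro h y
        have := h y
        rw [PySem.Dict.getD_insert]
        by_cases hy : y = x
        · subst hy; rw [if_pos rfl]
          rw [List.count_cons_self] at this; push_cast at this ⊢; omega
        · rw [if_neg hy]
          rw [List.count_cons_of_ne (Ne.symm hy)] at this; exact this

-- the inner part of B, with the count characterisation
theorem pvB_counts (c u : List Int) :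
    pvBDec (c.foldl (fun d x => d.insert x (d.getD x 0 + 1)) PySem.Dict.empty) u = true ↔
      ∀ y, u.count y ≤ c.count y := by
  rw [PySem.Dict.foldl_insert_getD_add_one_eq_counter]
  rw [pvBDec_eq_true_iff u _ (by intro y; rw [PySem.Dict.getD_counter]; positivity)]
  constructor
  · intro h y; have := h y; rw [PySem.Dict.getD_counter] at this; exact_mod_cast this
  · intro h y; rw [PySem.Dict.getD_counter]; exact_mod_cast h y

-- for equal-length lists, 'all counts of u fit in c' is exactly a permutation
theorem counts_perm (c u : List Int) (hlen : u.length = c.length) :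
    (∀ y, u.count y ≤ c.count y) ↔ u.Perm c := by
  constructor
  · intro h
    have hsub : List.Subperm u c := List.subperm_ext_iff.mpr (fun y _ => h y)
    exact hsub.perm_of_length_le (by omega)
  · intro h y; exact (h.count_eq y).le

-- ===== VERDICT (by name: the statement is the Claim_ definition above) =====
theorem checkPathUpdated_spec : Claim_equal_checkPathUpdated := by
  intro c u _
  unfold Spec_checkPathUpdated checkPathUpdated checkPathUpdated_alt
  by_cases hlen : u.length = c.length
  · simp only [hlen, ne_eq, not_true_eq_false, if_false]
    have hA := pvALoop_range (PySem.List.sorted c (fun x => x) false)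
      (PySem.List.sorted u (fun x => x) false)
      (by rw [PySem.List.length_sorted, PySem.List.length_sorted, hlen])
    have hB := (pvB_counts c u).trans (counts_perm c u hlen)
    have key : (PySem.List.sorted c (fun x => x) false = PySem.List.sorted u (fun x => x) false)
        ↔ u.Perm c := by
      rw [PySem.List.sorted_id_eq_sorted_id_iff_perm]
      exact ⟨fun h => h.symm, fun h => h.symm⟩
    rw [Bool.eq_iff_iff, hA, hB, key]
  · simp [hlen]
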